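-- pv_equiv track=rewrite | github.com/ariuk44/retake_exam_prep | day_1.py | isMadhavArray2
-- ===== SOURCE A (Python) =====
-- def isMadhavArray2(arr):
--     n = len(arr)
--     k = 1
--     total = 1
--     while total < n:
--         k += 1
--         total += k
--     if total != n:
--         return 0
--     target = arr[0]
--     idx = 1
--     group_size = 2
--     while idx < n:
--         if sum(arr[idx: idx + group_size]) != target:
--             return 0
--         idx += group_size
--         group_size += 1
--     return 1
-- ===== SOURCE B (Python) =====
-- def isMadhavArray2(arr):
--     # One forward pass: accumulate groups of sizes 2, 3, ... and compare
--     # each completed group to arr[0]; valid only if the last group completes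
--     # exactly at the end of the array.
--     if not arr:
--         return 0
--     target = arr[0]
--     run = 0
--     size = 0
--     need = 2
--     for x in arr[1:]:
--         run += x
--         size += 1
--         if size == need:
--             if run != target:
--                 return 0
--             run = 0
--             size = 0
--             need += 1
--     return 1 if size == 0 else 0
-- ===== Notes on version B (the rewrite author's own statement) =====
-- stated objective: simpler
-- what changed: Replaces A's triangular-length precomputation loop plus repeated slice-and-sum group scan with a single forward pass keeping a running sum, current group size and expected group size, accepting only if the pass ends exactly on a group boundary.
import Mathlib
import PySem

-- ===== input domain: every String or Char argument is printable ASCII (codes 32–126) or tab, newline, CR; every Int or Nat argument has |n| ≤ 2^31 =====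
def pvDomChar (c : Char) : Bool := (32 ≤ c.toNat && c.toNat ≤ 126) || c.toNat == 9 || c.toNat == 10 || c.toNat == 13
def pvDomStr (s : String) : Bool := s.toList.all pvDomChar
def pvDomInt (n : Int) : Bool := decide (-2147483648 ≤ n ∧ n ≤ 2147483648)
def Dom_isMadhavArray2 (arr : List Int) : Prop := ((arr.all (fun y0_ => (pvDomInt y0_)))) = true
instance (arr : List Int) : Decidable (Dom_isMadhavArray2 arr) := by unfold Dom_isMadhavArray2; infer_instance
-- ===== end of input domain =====

-- B replaces A's triangular-length loop + repeated slice-and-sum scan with one forward pass (simpler).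


-- ===== PORT A =====
-- A's counters k, total, idx, group_size start at 1, 1, 1, 2 and only grow, so they are
-- kept as Nat (their values coincide with the Python ints); group_size is carried as g with
-- group_size = g + 2 so the termination measure n - idx decreases without a side condition.

-- first while-loop: 'while total < n: k += 1; total += k'; returns the final total (k is dead after the loop)
def pvTrLoop (n k total : Nat) : Nat :=
  if total < n then pvTrLoop n (k + 1) (total + (k + 1)) else total
termination_by n - total

-- second while-loop: 'while idx < n: if sum(arr[idx:idx+group_size]) != target: return 0 …'
def pvALoop (arr : List Int) (n : Nat) (target : Int) (idx g : Nat) : Int :=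
  if idx < n then
    if (PySem.List.slice arr (some (idx : Int)) (some ((idx : Int) + ((g : Int) + 2)))).sum ≠ target then 0
    else pvALoop arr n target (idx + (g + 2)) (g + 1)
  else 1
termination_by n - idx

def isMadhavArray2 (arr : List Int) : Int :=
  -- n, total, target inlined
  if pvTrLoop arr.length 1 1 ≠ arr.length then 0
  else
    -- arr[0]: always in range here, since total = n and total ≥ 1 (the getD 0 is unreachable)
    pvALoop arr arr.length ((PySem.List.pyGet? arr 0).getD 0) 1 0

-- ===== PORT B =====
-- for-loop of Source B: running sum `run`, current group size `size`, expected size `need`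
def pvBLoop (xs : List Int) (target : Int) (run : Int) (size need : Nat) : Int :=
  match xs with
  | [] => if size = 0 then 1 else 0
  | x :: rest =>
      if size + 1 = need then
        if run + x ≠ target then 0 else pvBLoop rest target 0 0 (need + 1)
      else pvBLoop rest target (run + x) (size + 1) need

def isMadhavArray2_alt (arr : List Int) : Int :=
  match arr with
  | [] => 0
  | a :: rest => pvBLoop rest a 0 0 2

-- ===== PRECONDITION & SPEC =====
def Spec_isMadhavArray2 (arr : List Int) (out : Int) : Prop := out = isMadhavArray2_alt arr
instance (arr : List Int) (out : Int) : Decidable (Spec_isMadhavArray2 arr out) := by unfold Spec_isMadhavArray2; infer_instance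

-- ===== CLAIM (what is proved, stated in full; the proofs are below) =====
def Claim_equal_isMadhavArray2 : Prop := ∀ (arr : List Int), Dom_isMadhavArray2 arr → Spec_isMadhavArray2 arr (isMadhavArray2 arr)

-- ===== LEMMAS AND PROOFS =====

-- pvS a j = a + (a+1) + … + (a+j-1): total length of j consecutive groups starting at size a
def pvS (a j : Nat) : Nat :=
  match j with
  | 0 => 0
  | j + 1 => a + pvS (a + 1) j

theorem pvBLoop_nil (target run : Int) (size need : Nat) :
    pvBLoop [] target run size need = if size = 0 then 1 else 0 := rfl

theorem pvBLoop_cons (x : Int) (rest : List Int) (target run : Int) (size need : Nat) :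
    pvBLoop (x :: rest) target run size need =
      if size + 1 = need then
        if run + x ≠ target then 0 else pvBLoop rest target 0 0 (need + 1)
      else pvBLoop rest target (run + x) (size + 1) need := rfl

theorem pvTrLoop_ge (n k total : Nat) (h : n ≤ total) : pvTrLoop n k total = total := by
  unfold pvTrLoop; simp [Nat.not_lt.mpr h]

-- the loop run on a reachable target stops exactly there
theorem pvTrLoop_fixed (j : Nat) : ∀ (k total : Nat),
    pvTrLoop (total + pvS (k + 1) j) k total = total + pvS (k + 1) j := by
  induction j with
  | zero => intro k total; simp [pvS, pvTrLoop_ge]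
  | succ j ih =>
      intro k total
      have hunf : pvS (k + 1) (j + 1) = (k + 1) + pvS ((k + 1) + 1) j := rfl
      have hlt : total < total + pvS (k + 1) (j + 1) := by omega
      have harr : total + pvS (k + 1) (j + 1) = (total + (k + 1)) + pvS ((k + 1) + 1) j := by omega
      rw [pvTrLoop, if_pos hlt, harr]
      exact ih (k + 1) (total + (k + 1))

-- every value the loop returns is of the form total + pvS (k+1) j
theorem pvTrLoop_form (n k total : Nat) : ∃ j, pvTrLoop n k total = total + pvS (k + 1) j := by
  by_cases h : total < n
  · rw [pvTrLoop, if_pos h]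
    obtain ⟨j, hj⟩ := pvTrLoop_form n (k + 1) (total + (k + 1))
    refine ⟨j + 1, ?_⟩
    rw [hj]
    simp [pvS]; omega
  · exact ⟨0, by simp [pvS, pvTrLoop_ge n k total (Nat.not_lt.mp h)]⟩
termination_by n - total

-- B's loop returns only 0 or 1
theorem pvBLoop_zero_or_one (xs : List Int) : ∀ (target run : Int) (size need : Nat),
    pvBLoop xs target run size need = 0 ∨ pvBLoop xs target run size need = 1 := by
  induction xs with
  | nil => intro _ _ size _; rw [pvBLoop_nil]; split <;> simp
  | cons x rest ih =>
      intro target run size need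
      rw [pvBLoop_cons]
      split
      · split
        · left; rfl
        · exact ih target 0 0 (need + 1)
      · exact ih target (run + x) (size + 1) need

-- if B's loop returns 1, the remaining length fits the group pattern
theorem pvBLoop_one_len (xs : List Int) : ∀ (target run : Int) (size need : Nat),
    pvBLoop xs target run size need = 1 → ∃ j, size + xs.length = pvS need j := by
  induction xs with
  | nil =>
      intro _ _ size _ h1
      rw [pvBLoop_nil] at h1
      split at h1
      · exact ⟨0, by simp [pvS]; omega⟩
      · simp at h1
  | cons x rest ih =>
      intro target run size need h1
      rw [pvBLoop_cons] at h1
      split at h1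
      · rename_i hsz
        split at h1
        · simp at h1
        · obtain ⟨j, hj⟩ := ih target 0 0 (need + 1) h1
          exact ⟨j + 1, by simp [pvS, List.length_cons]; omega⟩
      · obtain ⟨j, hj⟩ := ih target (run + x) (size + 1) need h1
        exact ⟨j, by simp [List.length_cons] at hj ⊢; omega⟩

-- running B's loop through one exact group of size c = need - size
theorem pvBLoop_chunk (c : Nat) : ∀ (xs : List Int) (target run : Int) (size need : Nat),
    size + c = need → c ≤ xs.length → 1 ≤ c →
    pvBLoop xs target run size need =
      if run + (xs.take c).sum ≠ target then 0 else pvBLoop (xs.drop c) target 0 0 (need + 1) := by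
  induction c with
  | zero => intro _ _ _ _ _ _ _ hc; omega
  | succ c ih =>
      intro xs target run size need hsum hlen _
      match xs with
      | [] => simp at hlen
      | x :: rest =>
          by_cases hc : c = 0
          · subst hc
            rw [pvBLoop_cons, if_pos (show size + 1 = need by omega)]
            simp only [List.take_succ_cons, List.take_zero, List.sum_cons, List.sum_nil,
              add_zero, List.drop_succ_cons, List.drop_zero]
          · rw [pvBLoop_cons, if_neg (show ¬ size + 1 = need by omega)]
            rw [ih rest target (run + x) (size + 1) need (by omega)
                (by simp [List.length_cons] at hlen; omega) (by omega)]
            simp only [List.take_succ_cons, List.sum_cons, List.drop_succ_cons, add_assoc]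

-- main loop equivalence: A's slice-and-sum loop equals B's single pass on the suffix
theorem pvLoop_equiv (j : Nat) : ∀ (g idx : Nat) (arr : List Int) (target : Int),
    idx ≤ arr.length → arr.length - idx = pvS (g + 2) j →
    pvALoop arr arr.length target idx g = pvBLoop (arr.drop idx) target 0 0 (g + 2) := by
  induction j with
  | zero =>
      intro g idx arr target hle hlen
      simp [pvS] at hlen
      rw [pvALoop, if_neg (by omega)]
      have hnil : arr.drop idx = [] := List.drop_eq_nil_of_le (by omega)
      rw [hnil, pvBLoop_nil]; simp
  | succ j ih =>
      intro g idx arr target hle hlen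
      have hstep : pvS (g + 2) (j + 1) = (g + 2) + pvS ((g + 1) + 2) j := by
        have h21 : (g + 2) + 1 = (g + 1) + 2 := by omega
        simp [pvS, h21]
      rw [hstep] at hlen
      have hlt : idx < arr.length := by omega
      rw [pvALoop, if_pos hlt]
      have hslice : PySem.List.slice arr (some (idx : Int)) (some ((idx : Int) + ((g : Int) + 2)))
          = (arr.drop idx).take (g + 2) := by
        have hcast : ((idx : Int) + ((g : Int) + 2)) = ((idx + (g + 2) : Nat) : Int) := by push_cast; ring
        rw [hcast, PySem.List.slice_natCast]
        have : (idx + (g + 2)) - idx = g + 2 := by omega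
        rw [this]
      have hdroplen : g + 2 ≤ (arr.drop idx).length := by
        simp [List.length_drop]; omega
      rw [pvBLoop_chunk (g + 2) (arr.drop idx) target 0 0 ((g + 2)) (by omega) hdroplen (by omega)]
      rw [hslice]
      simp only [zero_add]
      split
      · rfl
      · have hrec := ih (g + 1) (idx + (g + 2)) arr target (by omega) (by omega)
        rw [hrec]
        have hdd : arr.drop (idx + (g + 2)) = (arr.drop idx).drop (g + 2) := by
          rw [List.drop_drop]
        have hnn : (g + 1) + 2 = (g + 2) + 1 := by omega
        rw [hdd, hnn]

-- ===== VERDICT (by name: the statement is the Claim_ definition above) =====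
theorem isMadhavArray2_spec : Claim_equal_isMadhavArray2 := by
  intro arr _
  unfold Spec_isMadhavArray2 isMadhavArray2 isMadhavArray2_alt
  match arr with
  | [] =>
      simp [pvTrLoop_ge 0 1 1 (by omega)]
  | a :: rest =>
      show (if pvTrLoop (a :: rest).length 1 1 ≠ (a :: rest).length then (0 : Int)
            else pvALoop (a :: rest) (a :: rest).length ((PySem.List.pyGet? (a :: rest) 0).getD 0) 1 0)
          = pvBLoop rest a 0 0 2
      by_cases htri : ∃ j, (a :: rest).length = 1 + pvS 2 j
      · obtain ⟨j, hj⟩ := htri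
        have hfix : pvTrLoop (a :: rest).length 1 1 = (a :: rest).length := by
          rw [hj]
          have := pvTrLoop_fixed j 1 1
          simpa using this
        rw [if_neg (by rw [hfix]; simp)]
        have hget : (PySem.List.pyGet? (a :: rest) 0).getD 0 = a := by
          simp [PySem.List.pyGet?, PySem.List.pyIdx?]
        rw [hget]
        have hmain := pvLoop_equiv j 0 1 (a :: rest) a (by simp)
          (show (a :: rest).length - 1 = pvS 2 j by omega)
        simpa using hmain
      · have hne : pvTrLoop (a :: rest).length 1 1 ≠ (a :: rest).length := by
          intro h
          obtain ⟨j, hj⟩ := pvTrLoop_form (a :: rest).length 1 1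
          simp only [show (1 : Nat) + 1 = 2 from rfl] at hj
          exact htri ⟨j, by omega⟩
        rw [if_pos hne]
        rcases pvBLoop_zero_or_one rest a 0 0 2 with h0 | h1
        · rw [h0]
        · exfalso
          obtain ⟨j, hj⟩ := pvBLoop_one_len rest a 0 0 2 h1
          exact htri ⟨j, by simp [List.length_cons] at hj ⊢; omega⟩
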